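-- pv_equiv track=rewrite | github.com/Alexhyungnim/Agents_4_expermients | judge/common.py | _match_allowed_items
-- ===== SOURCE A (Python) =====
-- def _match_allowed_items(items: list[str], allowed_items: list[str]) -> list[str]:
--     allowed_map = {item.strip().lower(): item for item in allowed_items if item.strip()}
--     matched: list[str] = []
--     for item in items:
--         normalized = item.strip().lower()
--         if normalized in allowed_map:
--             matched.append(allowed_map[normalized])
--     return _merge_unique_strings(matched)
--
-- def _merge_unique_strings(values: list[str]) -> list[str]:
--     out: list[str] = []
--     seen: set[str] = set()
--     for value in values:
--         text = str(value).strip()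
--         if text and text not in seen:
--             out.append(text)
--             seen.add(text)
--     return out
-- ===== SOURCE B (Python) =====
-- def _match_allowed_items(items: list[str], allowed_items: list[str]) -> list[str]:
--     # No dict, no seen-set: for each item scan allowed_items backwards (last matching
--     # allowed entry wins, like dict insertion overwrite), then remove later duplicates
--     # by recursive filtering (classic "nub by filter").
--     def lookup(norm):
--         for cand in reversed(allowed_items):
--             text = cand.strip()
--             if text and text.lower() == norm:
--                 return text
--         return None
--
--     def dedup(vals):
--         if not vals:
--             return []
--         head = vals[0]
--         return [head] + dedup([v for v in vals[1:] if v != head])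
--
--     return dedup([v for v in (lookup(i.strip().lower()) for i in items) if v is not None])
-- ===== Notes on version B (the rewrite author's own statement) =====
-- stated objective: alternative
-- what changed: B drops A's dict and seen-set entirely: it resolves each item by a backwards linear scan of allowed_items (first match in reverse = A's last-wins dict overwrite) and removes duplicates by a recursive nub that filters later occurrences out of the tail, instead of A's hash-map build plus seen-set merge pass.
import Mathlib
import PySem

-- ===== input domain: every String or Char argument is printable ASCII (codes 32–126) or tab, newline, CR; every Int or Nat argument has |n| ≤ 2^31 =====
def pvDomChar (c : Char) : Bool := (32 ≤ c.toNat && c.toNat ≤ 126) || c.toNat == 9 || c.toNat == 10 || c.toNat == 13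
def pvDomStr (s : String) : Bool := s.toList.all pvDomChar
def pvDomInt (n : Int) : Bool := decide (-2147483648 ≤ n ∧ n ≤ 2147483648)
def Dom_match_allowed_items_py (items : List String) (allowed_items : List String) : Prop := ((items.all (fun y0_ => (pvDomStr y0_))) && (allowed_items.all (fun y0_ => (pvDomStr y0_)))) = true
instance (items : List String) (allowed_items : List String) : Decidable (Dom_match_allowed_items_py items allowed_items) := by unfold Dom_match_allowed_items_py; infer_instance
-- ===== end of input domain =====

-- B replaces A's dict + seen-set with a backwards linear scan of allowed_items per item and a recursive filter-based nub (alternative algorithm; same return value).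

-- ===== PORT A =====
-- helper _merge_unique_strings: strip each value, keep first occurrences of nonempty texts
def mergeUniqueStrings (values : List String) : List String :=
  (values.foldl (fun (st : List String × PySem.Set String) value =>
      let text := PySem.Str.strip value
      if text ≠ "" ∧ ¬ PySem.Set.contains st.2 text then
        (st.1 ++ [text], PySem.Set.add st.2 text)
      else st)
    ([], PySem.Set.empty)).1

def match_allowed_items_py (items : List String) (allowed_items : List String) : List String :=
  let allowed_map : PySem.Dict String String :=
    allowed_items.foldl (fun d item =>
      if PySem.Str.strip item ≠ "" then
        d.insert (PySem.Str.lower (PySem.Str.strip item)) item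
      else d) PySem.Dict.empty
  let matched : List String :=
    items.foldl (fun matched item =>
      let normalized := PySem.Str.lower (PySem.Str.strip item)
      -- 'normalized in allowed_map' + 'allowed_map[normalized]' as one lookup
      match allowed_map.get? normalized with
      | some v => matched ++ [v]
      | none => matched) []
  mergeUniqueStrings matched

-- ===== PORT B =====
-- B's lookup: scan reversed(allowed_items), return the first stripped candidate matching norm
def pvLookup (allowed_items : List String) (norm : String) : Option String :=
  (allowed_items.reverse.find? (fun cand =>
      PySem.Str.strip cand ≠ "" ∧ PySem.Str.lower (PySem.Str.strip cand) = norm)).map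
    PySem.Str.strip

-- B's dedup: keep the head, recursively nub the tail with the head filtered out
def pvDedup : List String → List String
  | [] => []
  | v :: rest => v :: pvDedup (rest.filter (fun w => w ≠ v))
termination_by l => l.length
decreasing_by
  simp only [List.length_unattach, List.length_cons, Nat.lt_succ_iff]
  exact le_trans (List.length_filter_le _ _) (le_of_eq List.length_attach)

def match_allowed_items_py_alt (items : List String) (allowed_items : List String) : List String :=
  pvDedup (items.filterMap (fun item =>
    pvLookup allowed_items (PySem.Str.lower (PySem.Str.strip item))))

-- ===== PRECONDITION & SPEC =====
def Spec_match_allowed_items_py (items : List String) (allowed_items : List String) (out : List String) : Prop := out = match_allowed_items_py_alt items allowed_items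
instance (items : List String) (allowed_items : List String) (out : List String) : Decidable (Spec_match_allowed_items_py items allowed_items out) := by unfold Spec_match_allowed_items_py; infer_instance

-- ===== CLAIM (what is proved, stated in full; the proofs are below) =====
def Claim_equal_match_allowed_items_py : Prop := ∀ (items : List String) (allowed_items : List String), Dom_match_allowed_items_py items allowed_items → Spec_match_allowed_items_py items allowed_items (match_allowed_items_py items allowed_items)

-- ===== LEMMAS AND PROOFS =====

-- unfolding equations of pvDedup (its compiled equations go through List.attach)
theorem pvDedup_nil : pvDedup [] = [] := by
  simp only [pvDedup]

theorem pvDedup_cons (v : String) (rest : List String) :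
    pvDedup (v :: rest) = v :: pvDedup (rest.filter (fun w => ¬ w = v)) := by
  conv_lhs => rw [pvDedup]

-- A's foldl-built dict looked up at k is B's reverse scan of allowed_items
theorem pv_dict_eq_rev_find (l : List String) (d : PySem.Dict String String) (k : String) :
    (l.foldl (fun d item =>
        if PySem.Str.strip item ≠ "" then
          d.insert (PySem.Str.lower (PySem.Str.strip item)) item else d) d).get? k
      = ((l.reverse.find? (fun cand =>
          PySem.Str.strip cand ≠ "" ∧ PySem.Str.lower (PySem.Str.strip cand) = k)).or (d.get? k)) := by
  induction l generalizing d with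
  | nil => simp
  | cons item rest ih =>
    simp only [List.foldl_cons, List.reverse_cons, List.find?_append, ih]
    cases hfind : rest.reverse.find? (fun cand =>
        PySem.Str.strip cand ≠ "" ∧ PySem.Str.lower (PySem.Str.strip cand) = k) with
    | some c => simp [Option.or]
    | none =>
      simp only [Option.none_or, List.find?_singleton]
      by_cases hs : PySem.Str.strip item = ""
      · simp [hs]
      · by_cases hk : PySem.Str.lower (PySem.Str.strip item) = k
        · simp [hs, hk, PySem.Dict.get?_insert_self]
        · simp [hs, hk, PySem.Dict.get?_insert_of_ne _ _ (by exact fun h => hk h.symm)]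

-- A's matching loop collects the filterMap of the lookup
theorem pv_foldl_append_filterMap (f : String → Option String) (l : List String) (acc : List String) :
    l.foldl (fun m item => match f item with | some v => m ++ [v] | none => m) acc
      = acc ++ l.filterMap f := by
  induction l generalizing acc with
  | nil => simp
  | cons x xs ih =>
    cases hx : f x <;> simp [List.foldl_cons, hx, ih]

-- on values with nonempty strip, the merge fold is the plain dedup fold over the stripped values
theorem pv_merge_align (vs : List String) (st : List String × PySem.Set String)
    (h : ∀ v ∈ vs, PySem.Str.strip v ≠ "") :
    vs.foldl (fun st value =>
        let text := PySem.Str.strip value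
        if text ≠ "" ∧ ¬ PySem.Set.contains st.2 text then
          (st.1 ++ [text], PySem.Set.add st.2 text)
        else st) st
      = (vs.map PySem.Str.strip).foldl (fun st v =>
          if ¬ PySem.Set.contains st.2 v then (st.1 ++ [v], PySem.Set.add st.2 v) else st) st := by
  induction vs generalizing st with
  | nil => rfl
  | cons v rest ih =>
    have hv : PySem.Str.strip v ≠ "" := h v (List.mem_cons_self ..)
    simp only [List.map_cons, List.foldl_cons, hv, ne_eq, not_false_eq_true, true_and]
    split_ifs with hc <;>
      exact ih _ (fun w hw => h w (List.mem_cons_of_mem _ hw))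

-- the seen-set dedup fold is B's recursive filter-based nub
theorem pv_fold_eq_dedup (vs : List String) (acc : List String) (s : PySem.Set String) :
    (vs.foldl (fun st v =>
        if ¬ PySem.Set.contains st.2 v then (st.1 ++ [v], PySem.Set.add st.2 v) else st)
      (acc, s)).1
      = acc ++ pvDedup (vs.filter (fun v => ¬ PySem.Set.contains s v)) := by
  induction hL : vs.length using Nat.strong_induction_on generalizing vs acc s with
  | _ n ih =>
    cases vs with
    | nil => simp [pvDedup_nil]
    | cons v rest =>
      rw [List.foldl_cons, List.filter_cons]
      by_cases hc : PySem.Set.contains s v = true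
      · have hm : v ∈ s := by simpa [PySem.Set.contains] using hc
        rw [if_neg (not_not_intro hc), if_neg (by simp [hm])]
        exact ih _ (by simp at hL; omega) rest acc s rfl
      · have hm : v ∉ s := by simpa [PySem.Set.contains] using hc
        rw [if_pos hc, if_pos (by simp [hm])]
        have ihr := ih _ (by simp at hL; omega) rest (acc ++ [v]) (PySem.Set.add s v) rfl
        rw [ihr]
        have step : rest.filter (fun w => ¬ PySem.Set.contains (PySem.Set.add s v) w)
            = (rest.filter (fun w => ¬ PySem.Set.contains s w)).filter (fun w => ¬ w = v) := by
          rw [List.filter_filter]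
          apply List.filter_congr
          intro w _
          simp [Bool.and_comm]
        rw [step, pvDedup_cons]
        simp

-- ===== VERDICT (by name: the statement is the Claim_ definition above) =====
theorem match_allowed_items_py_spec : Claim_equal_match_allowed_items_py := by
  intro items allowed_items _
  unfold Spec_match_allowed_items_py match_allowed_items_py match_allowed_items_py_alt mergeUniqueStrings
  dsimp only
  have hget : ∀ k, (allowed_items.foldl (fun d item =>
      if PySem.Str.strip item ≠ "" then
        d.insert (PySem.Str.lower (PySem.Str.strip item)) item else d)
      PySem.Dict.empty).get? k
      = allowed_items.reverse.find? (fun cand =>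
          PySem.Str.strip cand ≠ "" ∧ PySem.Str.lower (PySem.Str.strip cand) = k) := by
    intro k
    rw [pv_dict_eq_rev_find]
    simp [PySem.Dict.empty, PySem.Dict.get?]
  rw [pv_foldl_append_filterMap, List.nil_append,
    pv_merge_align _ _ (by
      intro v hv
      rcases List.mem_filterMap.mp hv with ⟨item, _, hitem⟩
      rw [hget] at hitem
      have hp := List.find?_some hitem
      simp only [decide_eq_true_eq] at hp
      exact hp.1)]
  rw [pv_fold_eq_dedup, List.nil_append]
  have hfil : ∀ (vs : List String),
      vs.filter (fun v => ¬ PySem.Set.contains PySem.Set.empty v) = vs := by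
    intro vs
    simp [PySem.Set.contains, PySem.Set.empty]
  rw [hfil, List.map_filterMap]
  congr 1
  apply List.filterMap_congr
  intro item _
  rw [hget]
  rfl
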